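-- pv_equiv track=rewrite | github.com/Froser/Kiwi-Machine | src/client/kiwi_machine_core/build/gen_font_resources.py | GenTokenName
-- ===== SOURCE A (Python) =====
-- def GenTokenName(filename):
--     result = 'k'
--     next_is_upper = True
--     for char in filename:
--         if char.isalpha():
--             if next_is_upper:
--                 result += char.upper()
--                 next_is_upper = False
--             else:
--                 result += char.lower()
--         elif char.isnumeric():
--             result += char
--         elif char.isspace() or char == '_':
--             next_is_upper = True
--     return result
-- ===== SOURCE B (Python) =====
-- def GenTokenName(filename):
--     # Pass 1: split into segments on whitespace or '_' (same separator predicate as A).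
--     segments = []
--     cur = []
--     for ch in filename:
--         if ch.isspace() or ch == '_':
--             segments.append(cur)
--             cur = []
--         else:
--             cur.append(ch)
--     segments.append(cur)
--     # Pass 2: render each segment, capitalizing its first alphabetic character.
--     out = ['k']
--     for seg in segments:
--         first_alpha = True
--         for ch in seg:
--             if ch.isalpha():
--                 out.append(ch.upper() if first_alpha else ch.lower())
--                 first_alpha = False
--             elif ch.isnumeric():
--                 out.append(ch)
--     return ''.join(out)
-- ===== Notes on version B (the rewrite author's own statement) =====
-- stated objective: alternative
-- what changed: B replaces A's single pass with a capitalize-flag carried across separators by a two-pass word-list decomposition: first split the filename into segments at whitespace/underscore, then render each segment, uppercasing its first alphabetic character, onto the constant prefix.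
import Mathlib
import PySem

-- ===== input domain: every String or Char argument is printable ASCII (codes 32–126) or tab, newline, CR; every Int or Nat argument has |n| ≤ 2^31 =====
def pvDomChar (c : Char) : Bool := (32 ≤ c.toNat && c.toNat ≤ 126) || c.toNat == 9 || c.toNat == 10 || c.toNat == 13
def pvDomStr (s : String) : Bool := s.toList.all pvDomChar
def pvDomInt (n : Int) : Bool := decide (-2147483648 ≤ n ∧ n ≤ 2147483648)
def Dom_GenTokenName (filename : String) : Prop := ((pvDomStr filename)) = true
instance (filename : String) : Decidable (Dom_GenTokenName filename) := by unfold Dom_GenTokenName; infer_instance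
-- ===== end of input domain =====

-- B splits the filename into separator-delimited segments first and then renders each
-- segment, capitalizing its first alphabetic character, instead of A's single pass with a
-- flag carried across separators (objective: alternative decomposition, same cost).


-- ===== PORT A =====
-- A's loop body: state = (result so far, next_is_upper).
-- char.isnumeric() is ported as PySem.Chars.isdigit (identical on the printable-ASCII domain).
def stepA (st : List Char × Bool) (c : Char) : List Char × Bool :=
  if PySem.Chars.isalpha c then
    if st.2 then (st.1 ++ [PySem.Chars.upperChar c], false)
    else (st.1 ++ [PySem.Chars.lowerChar c], st.2)
  else if PySem.Chars.isdigit c then (st.1 ++ [c], st.2)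
  else if PySem.Chars.isspace c || c == '_' then (st.1, true)
  else st

def GenTokenName (filename : String) : String :=
  String.ofList (filename.toList.foldl stepA (['k'], true)).1

-- ===== PORT B =====
-- B pass 1 loop body: state = (completed segments, current segment).
def splitStepB (st : List (List Char) × List Char) (c : Char) : List (List Char) × List Char :=
  if PySem.Chars.isspace c || c == '_' then (st.1 ++ [st.2], [])
  else (st.1, st.2 ++ [c])

-- B pass 2 inner loop body: state = (output so far, first_alpha).
def renderStepB (st : List Char × Bool) (c : Char) : List Char × Bool :=
  if PySem.Chars.isalpha c then
    (st.1 ++ [if st.2 then PySem.Chars.upperChar c else PySem.Chars.lowerChar c], false)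
  else if PySem.Chars.isdigit c then (st.1 ++ [c], st.2)
  else st

def GenTokenName_alt (filename : String) : String :=
  let sp := filename.toList.foldl splitStepB ([], [])
  let segments := sp.1 ++ [sp.2]
  String.ofList (segments.foldl (fun acc seg => (seg.foldl renderStepB (acc, true)).1) ['k'])

-- ===== PRECONDITION & SPEC =====
def Spec_GenTokenName (filename : String) (out : String) : Prop := out = GenTokenName_alt filename
instance (filename : String) (out : String) : Decidable (Spec_GenTokenName filename out) := by unfold Spec_GenTokenName; infer_instance

-- ===== CLAIM (what is proved, stated in full; the proofs are below) =====
def Claim_equal_GenTokenName : Prop := ∀ (filename : String), Dom_GenTokenName filename → Spec_GenTokenName filename (GenTokenName filename)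

-- ===== LEMMAS AND PROOFS =====

-- separator predicate shared by the proofs
def isSep (c : Char) : Bool := PySem.Chars.isspace c || c == '_'

-- recursive specification of B's pass-1 split
def splitRec : List Char → List Char → List (List Char)
  | [], cur => [cur]
  | c :: cs, cur =>
      if isSep c then cur :: splitRec cs [] else splitRec cs (cur ++ [c])

-- recursive specification of B's pass-2 rendering, threading a (result, flag) state
def renderSegs : List Char × Bool → List (List Char) → List Char
  | st, [] => st.1
  | st, seg :: rest => renderSegs ((seg.foldl renderStepB st).1, true) rest

theorem space_not_alpha {c : Char} (h : PySem.Chars.isspace c = true) :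
    PySem.Chars.isalpha c = false := by
  have hA : 'A'.val.toNat = 65 := by decide
  have hZ : 'Z'.val.toNat = 90 := by decide
  have ha : 'a'.val.toNat = 97 := by decide
  have hz : 'z'.val.toNat = 122 := by decide
  simp only [PySem.Chars.isspace, Bool.or_eq_true, Bool.and_eq_true, decide_eq_true_eq] at h
  simp only [PySem.Chars.isalpha, PySem.Chars.isupper, PySem.Chars.islower, Char.le_def,
    UInt32.le_iff_toNat_le, hA, hZ, ha, hz, Bool.or_eq_false_iff, Bool.and_eq_false_iff,
    decide_eq_false_iff_not, not_le, Char.toNat] at h ⊢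
  omega

theorem space_not_digit {c : Char} (h : PySem.Chars.isspace c = true) :
    PySem.Chars.isdigit c = false := by
  have h0 : '0'.val.toNat = 48 := by decide
  have h9 : '9'.val.toNat = 57 := by decide
  simp only [PySem.Chars.isspace, Bool.or_eq_true, Bool.and_eq_true, decide_eq_true_eq] at h
  simp only [PySem.Chars.isdigit, Char.le_def, UInt32.le_iff_toNat_le, h0, h9,
    Bool.and_eq_false_iff, decide_eq_false_iff_not, not_le, Char.toNat] at h ⊢
  omega

theorem sep_not_alpha {c : Char} (h : isSep c = true) :
    PySem.Chars.isalpha c = false := by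
  simp only [isSep, Bool.or_eq_true, beq_iff_eq] at h
  rcases h with h | h
  · exact space_not_alpha h
  · subst h; decide

theorem sep_not_digit {c : Char} (h : isSep c = true) :
    PySem.Chars.isdigit c = false := by
  simp only [isSep, Bool.or_eq_true, beq_iff_eq] at h
  rcases h with h | h
  · exact space_not_digit h
  · subst h; decide

theorem stepA_sep {c : Char} (st : List Char × Bool) (h : isSep c = true) :
    stepA st c = (st.1, true) := by
  have h' : (PySem.Chars.isspace c || c == '_') = true := h
  simp [stepA, sep_not_alpha h, sep_not_digit h, h']

theorem stepA_eq_renderStepB {c : Char} (st : List Char × Bool) (h : isSep c = false) :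
    stepA st c = renderStepB st c := by
  unfold stepA renderStepB
  have h' : (PySem.Chars.isspace c || c == '_') = false := h
  by_cases ha : PySem.Chars.isalpha c = true
  · simp only [ha, if_true]; cases hb : st.2 <;> simp_all
  · simp only [Bool.not_eq_true] at ha
    simp [ha, h']

-- rendering the split-with-a-pending-segment equals consuming the pending segment first
theorem renderSegs_splitRec (cs : List Char) :
    ∀ (cur : List Char) (st : List Char × Bool),
      renderSegs st (splitRec cs cur) = renderSegs (cur.foldl renderStepB st) (splitRec cs []) := by
  induction cs with
  | nil => intro cur st; simp [splitRec, renderSegs]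
  | cons c cs ih =>
      intro cur st
      by_cases h : isSep c = true
      · simp [splitRec, h, renderSegs]
      · simp only [Bool.not_eq_true] at h
        simp only [splitRec, h, Bool.false_eq_true, if_false, List.nil_append]
        rw [ih (cur ++ [c]) st, ih [c] (cur.foldl renderStepB st)]
        simp [List.foldl_append]

-- A's flag-carrying pass computes B's segment-wise rendering of the recursive split
theorem foldA_eq_renderSegs (cs : List Char) :
    ∀ (st : List Char × Bool), (cs.foldl stepA st).1 = renderSegs st (splitRec cs []) := by
  induction cs with
  | nil => intro st; simp [splitRec, renderSegs]
  | cons c cs ih =>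
      intro st
      by_cases h : isSep c = true
      · simp only [List.foldl_cons, stepA_sep st h, splitRec, h, if_true, renderSegs]
        simpa using ih (st.1, true)
      · simp only [Bool.not_eq_true] at h
        simp only [List.foldl_cons, splitRec, h, Bool.false_eq_true, if_false, List.nil_append]
        rw [ih (stepA st c), stepA_eq_renderStepB st h, renderSegs_splitRec cs [c] st]
        simp

-- B's accumulator split produces the recursive split
theorem splitFold_eq_splitRec (cs : List Char) :
    ∀ (segs : List (List Char)) (cur : List Char),
      (cs.foldl splitStepB (segs, cur)).1 ++ [(cs.foldl splitStepB (segs, cur)).2]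
        = segs ++ splitRec cs cur := by
  induction cs with
  | nil => intro segs cur; simp [splitRec]
  | cons c cs ih =>
      intro segs cur
      by_cases h : isSep c = true
      · have h' : (PySem.Chars.isspace c || c == '_') = true := h
        simp only [List.foldl_cons, splitStepB, h', if_true]
        simp [splitRec, h, ih (segs ++ [cur]) []]
      · simp only [Bool.not_eq_true] at h
        have h' : (PySem.Chars.isspace c || c == '_') = false := h
        simp only [List.foldl_cons, splitStepB, h', Bool.false_eq_true, if_false]
        simp [splitRec, h, ih segs (cur ++ [c])]

-- B's outer fold over segments is renderSegs started with a fresh flag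
theorem foldB_eq_renderSegs (segs : List (List Char)) :
    ∀ (acc : List Char),
      segs.foldl (fun acc seg => (seg.foldl renderStepB (acc, true)).1) acc
        = renderSegs (acc, true) segs := by
  induction segs with
  | nil => intro acc; simp [renderSegs]
  | cons seg rest ih => intro acc; simp [renderSegs, ih]

-- ===== VERDICT (by name: the statement is the Claim_ definition above) =====
theorem GenTokenName_spec : Claim_equal_GenTokenName := by
  intro filename _
  unfold Spec_GenTokenName GenTokenName GenTokenName_alt
  have hsplit := splitFold_eq_splitRec filename.toList [] []
  simp only [List.nil_append] at hsplit
  simp only [foldA_eq_renderSegs, hsplit, foldB_eq_renderSegs]
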